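-- pv_equiv track=rewrite | github.com/wjmmmwjj/auto_piano | playback/project_score_tools.py | merge_score_rests
-- ===== SOURCE A (Python) =====
-- def merge_score_rests(score: list[tuple]) -> list[tuple]:
--     merged: list[tuple] = []
--     for item in score:
--         if item[0] == 0 and merged and merged[-1][0] == 0:
--             merged[-1] = (0, int(merged[-1][1]) + int(item[1]))
--             continue
--         merged.append(item)
--     return merged
-- ===== SOURCE B (Python) =====
-- def merge_score_rests(score: list[tuple]) -> list[tuple]:
--     merged: list[tuple] = []
--     i = 0
--     n = len(score)
--     while i < n:
--         if score[i][0] == 0: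
--             total = 0
--             j = i
--             while j < n and score[j][0] == 0:
--                 total += int(score[j][1])
--                 j += 1
--             merged.append((0, total))
--             i = j
--         else:
--             merged.append(score[i])
--             i += 1
--     return merged
-- ===== Notes on version B (the rewrite author's own statement) =====
-- stated objective: alternative
-- what changed: Instead of appending and destructively re-writing the last accumulator entry whenever another rest arrives, B scans each maximal run of consecutive rests with an inner pointer, sums it once, and emits a single (0, total) entry forward-only.
import Mathlib
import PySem

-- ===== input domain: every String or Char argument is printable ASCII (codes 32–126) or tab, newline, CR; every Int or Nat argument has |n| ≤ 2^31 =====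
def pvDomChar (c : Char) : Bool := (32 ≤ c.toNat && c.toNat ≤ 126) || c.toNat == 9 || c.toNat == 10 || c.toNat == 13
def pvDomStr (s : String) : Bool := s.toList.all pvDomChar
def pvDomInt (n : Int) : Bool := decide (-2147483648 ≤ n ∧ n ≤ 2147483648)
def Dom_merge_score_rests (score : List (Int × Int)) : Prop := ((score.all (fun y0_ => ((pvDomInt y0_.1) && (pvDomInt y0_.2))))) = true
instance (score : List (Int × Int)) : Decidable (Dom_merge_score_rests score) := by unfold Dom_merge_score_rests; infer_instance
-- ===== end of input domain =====

-- B replaces A's append-then-rewrite-last accumulator by a forward-only scan that sums each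
-- maximal run of consecutive rests with an inner pointer (alternative decomposition, same cost).

-- ===== PORT A =====
-- one loop step of A: either rewrite merged's last entry, or append item
def pvStepA (merged : List (Int × Int)) (item : Int × Int) : List (Int × Int) :=
  if item.1 = 0 ∧ merged ≠ [] ∧ (merged.getLastD (0, 0)).1 = 0 then
    merged.dropLast ++ [(0, (merged.getLastD (0, 0)).2 + item.2)]
  else
    merged ++ [item]

def merge_score_rests (score : List (Int × Int)) : List (Int × Int) :=
  score.foldl pvStepA []

-- ===== PORT B =====
-- inner while loop of B: consume the rest-run starting at the current suffix, accumulating total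
def pvConsumeRest : List (Int × Int) → Int → Int × List (Int × Int)
  | [], total => (total, [])
  | x :: xs, total => if x.1 = 0 then pvConsumeRest xs (total + x.2) else (total, x :: xs)

theorem pvConsumeRest_length : ∀ (xs : List (Int × Int)) (t : Int),
    (pvConsumeRest xs t).2.length ≤ xs.length := by
  intro xs
  induction xs with
  | nil => intro t; simp [pvConsumeRest]
  | cons x xs ih =>
    intro t
    simp only [pvConsumeRest]
    split
    · exact le_trans (ih _) (Nat.le_succ _)
    · simp

def merge_score_rests_alt : List (Int × Int) → List (Int × Int)
  | [] => []
  | x :: xs =>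
    if x.1 = 0 then
      let p := pvConsumeRest xs x.2
      (0, p.1) :: merge_score_rests_alt p.2
    else
      x :: merge_score_rests_alt xs
termination_by xs => xs.length
decreasing_by
  · exact Nat.lt_succ_of_le (pvConsumeRest_length xs x.2)
  · simp

-- ===== PRECONDITION & SPEC =====
def Spec_merge_score_rests (score : List (Int × Int)) (out : List (Int × Int)) : Prop := out = merge_score_rests_alt score
instance (score : List (Int × Int)) (out : List (Int × Int)) : Decidable (Spec_merge_score_rests score out) := by unfold Spec_merge_score_rests; infer_instance

-- ===== CLAIM (what is proved, stated in full; the proofs are below) =====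
def Claim_equal_merge_score_rests : Prop := ∀ (score : List (Int × Int)), Dom_merge_score_rests score → Spec_merge_score_rests score (merge_score_rests score)

-- ===== LEMMAS AND PROOFS =====

-- accumulator shapes A's condition can see: empty, or last entry is not a rest
def pvOk (pre : List (Int × Int)) : Prop :=
  pre = [] ∨ (pre.getLastD (0, 0)).1 ≠ 0

theorem pvOk_append {pre : List (Int × Int)} {x : Int × Int} (hx : x.1 ≠ 0) :
    pvOk (pre ++ [x]) := by
  right; simp; exact hx

theorem pvStepA_ok {pre : List (Int × Int)} (h : pvOk pre) (item : Int × Int) :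
    pvStepA pre item = pre ++ [item] := by
  unfold pvStepA
  rw [if_neg]
  rintro ⟨h1, h2, h3⟩
  rcases h with h | h
  · exact h2 h
  · exact h h3

theorem pvStepA_notRest (m : List (Int × Int)) {item : Int × Int} (h : item.1 ≠ 0) :
    pvStepA m item = m ++ [item] := by
  unfold pvStepA
  rw [if_neg]
  rintro ⟨h1, _, _⟩
  exact h h1

theorem pvStepA_rest (pre : List (Int × Int)) (t : Int) {item : Int × Int} (h : item.1 = 0) :
    pvStepA (pre ++ [(0, t)]) item = pre ++ [(0, t + item.2)] := by
  unfold pvStepA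
  rw [if_pos]
  · simp
  · refine ⟨h, by simp, by simp⟩

-- joint invariant: the fold from an 'ok' accumulator is append of B's result; the fold from an
-- accumulator ending in an open rest (0,t) closes that run via pvConsumeRest
theorem pvMain : ∀ (n : ℕ) (xs : List (Int × Int)), xs.length ≤ n →
    (∀ pre, pvOk pre → xs.foldl pvStepA pre = pre ++ merge_score_rests_alt xs) ∧
    (∀ pre t, pvOk pre →
      xs.foldl pvStepA (pre ++ [(0, t)]) =
        pre ++ (0, (pvConsumeRest xs t).1) :: merge_score_rests_alt (pvConsumeRest xs t).2) := by
  intro n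
  induction n with
  | zero =>
    intro xs hxs
    have : xs = [] := List.length_eq_zero_iff.mp (Nat.le_zero.mp hxs)
    subst this
    constructor
    · intro pre _; simp [merge_score_rests_alt]
    · intro pre t _; simp [pvConsumeRest, merge_score_rests_alt]
  | succ n ih =>
    intro xs hxs
    match xs with
    | [] =>
      constructor
      · intro pre _; simp [merge_score_rests_alt]
      · intro pre t _; simp [pvConsumeRest, merge_score_rests_alt]
    | x :: xs' =>
      have hlen : xs'.length ≤ n := Nat.lt_succ_iff.mp hxs
      constructor
      · intro pre hpre
        by_cases hx : x.1 = 0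
        · have hx' : x = (0, x.2) := by
            rcases x with ⟨a, b⟩; simp at hx; simp [hx]
          rw [List.foldl_cons, pvStepA_ok hpre]
          rw [show pre ++ [x] = pre ++ [((0 : Int), x.2)] by rw [← hx']]
          rw [(ih xs' hlen).2 pre x.2 hpre]
          simp [merge_score_rests_alt, hx]
        · rw [List.foldl_cons, pvStepA_ok hpre,
            (ih xs' hlen).1 (pre ++ [x]) (pvOk_append hx)]
          simp [merge_score_rests_alt, hx]
      · intro pre t hpre
        by_cases hx : x.1 = 0
        · rw [List.foldl_cons, pvStepA_rest pre t hx,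
            (ih xs' hlen).2 pre (t + x.2) hpre]
          simp [pvConsumeRest, hx]
        · have hok : pvOk (pre ++ [(0, t)] ++ [x]) := pvOk_append hx
          rw [List.foldl_cons, pvStepA_notRest _ hx,
            (ih xs' hlen).1 (pre ++ [(0, t)] ++ [x]) hok]
          simp [pvConsumeRest, hx, merge_score_rests_alt]

-- ===== VERDICT (by name: the statement is the Claim_ definition above) =====
theorem merge_score_rests_spec : Claim_equal_merge_score_rests := by
  intro score _
  unfold Spec_merge_score_rests merge_score_rests
  have := (pvMain score.length score le_rfl).1 [] (Or.inl rfl)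
  simpa using this
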